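-- pv_equiv track=rewrite | github.com/manuel-voit/quadratic_sieve | src/quadratic_sieve.py | gen_parity_matrix
-- ===== SOURCE A (Python) =====
-- def gen_parity_matrix(fac_smooth_nums, factor_base):
--     """Generate the parity matrix based on the parity of the exponents of the prime coefficients from the factor base.
--
--     Input:
--         fac_smooth_nums: Factorization of the B-smooth numbers
--         factor_base: Factor base F
--
--     Output:
--         contains_square: Relations on the factor base contain square number
--         contains_square == True:
--             m: Empty list
--             fac: Factorization of the square number
--         contains_square == False:
--             m: Parity matrix
--             fac: Empty list
--     """
--
--     m = []
--     len_f = len(factor_base)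
--
--     for i, fac in enumerate(fac_smooth_nums):
--         exp_parity = [0] * len_f
--
--         for j in range(len_f):
--             if factor_base[j] in fac_smooth_nums[i]:
--                 exp_parity[j] = (fac_smooth_nums[i].count(factor_base[j])) % 2
--
--         if 1 not in exp_parity:
--             return True, [], fac
--         else:
--             pass
--
--         m.append(exp_parity)
--
--     return False, m, []
-- ===== SOURCE B (Python) =====
-- def gen_parity_matrix(fac_smooth_nums, factor_base):
--     """Position-index approach: map each factor-base prime to the list of
--     positions it occupies, build every parity row by toggling those positions
--     while walking the factorization, then scan the rows for an all-zero one."""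
--     pos = {}
--     for j, p in enumerate(factor_base):
--         pos.setdefault(p, []).append(j)
--     len_f = len(factor_base)
--     rows = []
--     for fac in fac_smooth_nums:
--         row = [0] * len_f
--         for p in fac:
--             for j in pos.get(p, []):
--                 row[j] = 1 - row[j]
--         rows.append(row)
--     for fac, row in zip(fac_smooth_nums, rows):
--         if 1 not in row:
--             return True, [], fac
--     return False, rows, []
-- ===== Notes on version B (the rewrite author's own statement) =====
-- stated objective: faster
-- what changed: B inverts the traversal: it builds a prime-to-positions index of the factor base once, then drives each row by walking the factorization and toggling the indexed parity bits (instead of scanning the whole factor base per row with membership tests and count rescans), and it separates row construction from the scan for an all-zero row.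
import Mathlib
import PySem

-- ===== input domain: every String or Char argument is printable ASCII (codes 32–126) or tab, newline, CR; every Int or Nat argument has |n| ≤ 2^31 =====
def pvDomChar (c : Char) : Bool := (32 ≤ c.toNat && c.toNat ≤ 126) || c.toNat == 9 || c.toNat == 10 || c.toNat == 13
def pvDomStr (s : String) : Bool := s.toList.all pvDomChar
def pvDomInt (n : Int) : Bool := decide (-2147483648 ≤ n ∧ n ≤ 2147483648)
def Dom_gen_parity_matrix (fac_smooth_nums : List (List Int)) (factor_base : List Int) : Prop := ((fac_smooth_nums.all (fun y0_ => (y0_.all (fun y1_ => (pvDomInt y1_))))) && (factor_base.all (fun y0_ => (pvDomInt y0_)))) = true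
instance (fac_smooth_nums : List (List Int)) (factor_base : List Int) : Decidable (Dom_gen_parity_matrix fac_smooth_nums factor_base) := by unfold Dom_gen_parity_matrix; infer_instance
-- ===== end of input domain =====

-- B builds a prime→positions index of the factor base once and toggles the indexed
-- parity bits while walking each factorization, then scans the rows for an all-zero one.

-- ===== PORT A =====
-- one parity row: [0]*len_f then exp_parity[j] = count % 2 where factor_base[j] in fac
def genParityRowA (factor_base fac : List Int) : List Int :=
  (List.range factor_base.length).map (fun j =>
    if factor_base.getD j 0 ∈ fac
    then PySem.Int.mod ((fac.count (factor_base.getD j 0) : Int)) 2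
    else 0)

-- the 'for i, fac in enumerate(fac_smooth_nums)' loop with its early return
def genParityLoopA (factor_base : List Int) (m : List (List Int)) :
    List (List Int) → Bool × List (List Int) × List Int
  | [] => (false, m, [])
  | fac :: rest =>
    let exp_parity := genParityRowA factor_base fac
    if (1 : Int) ∉ exp_parity then (true, [], fac)
    else genParityLoopA factor_base (m ++ [exp_parity]) rest

def gen_parity_matrix (fac_smooth_nums : List (List Int)) (factor_base : List Int) : Bool × List (List Int) × List Int :=
  genParityLoopA factor_base [] fac_smooth_nums

-- ===== PORT B =====
-- pos = {}; for j, p in enumerate(factor_base): pos.setdefault(p, []).append(j)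
def pvBuildPos (factor_base : List Int) : PySem.Dict Int (List Int) :=
  (PySem.List.enumerate factor_base 0).foldl
    (fun d jp => d.insert jp.2 (d.getD jp.2 [] ++ [jp.1])) PySem.Dict.empty

-- row = [0]*len_f; for p in fac: for j in pos.get(p, []): row[j] = 1 - row[j]
def pvRowB (pos : PySem.Dict Int (List Int)) (len_f : Nat) (fac : List Int) : List Int :=
  fac.foldl (fun r p =>
    (pos.getD p []).foldl (fun r j => PySem.List.pySetD r j (1 - PySem.List.pyGetD r j 0)) r)
    (List.replicate len_f 0)

-- for fac, row in zip(fac_smooth_nums, rows): if 1 not in row: return True, [], fac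
def pvScanB (rows : List (List Int)) : List (List Int × List Int) → Bool × List (List Int) × List Int
  | [] => (false, rows, [])
  | fr :: t => if (1 : Int) ∉ fr.2 then (true, [], fr.1) else pvScanB rows t

def gen_parity_matrix_alt (fac_smooth_nums : List (List Int)) (factor_base : List Int) : Bool × List (List Int) × List Int :=
  let pos := pvBuildPos factor_base
  let rows := fac_smooth_nums.map (pvRowB pos factor_base.length)
  pvScanB rows (fac_smooth_nums.zip rows)

-- ===== PRECONDITION & SPEC =====
def Spec_gen_parity_matrix (fac_smooth_nums : List (List Int)) (factor_base : List Int) (out : Bool × List (List Int) × List Int) : Prop := out = gen_parity_matrix_alt fac_smooth_nums factor_base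
instance (fac_smooth_nums : List (List Int)) (factor_base : List Int) (out : Bool × List (List Int) × List Int) : Decidable (Spec_gen_parity_matrix fac_smooth_nums factor_base out) := by unfold Spec_gen_parity_matrix; infer_instance

-- ===== CLAIM =====
def Claim_equal_gen_parity_matrix : Prop := ∀ (fac_smooth_nums : List (List Int)) (factor_base : List Int), Dom_gen_parity_matrix fac_smooth_nums factor_base → Spec_gen_parity_matrix fac_smooth_nums factor_base (gen_parity_matrix fac_smooth_nums factor_base)

-- ===== LEMMAS AND PROOFS =====

-- the dict fold that builds pos: lookup is the accumulated indices of p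
lemma pvPos_fold (l : List (Int × Int)) (d : PySem.Dict Int (List Int)) (p : Int) :
    ((l.foldl (fun d jp => d.insert jp.2 (d.getD jp.2 [] ++ [jp.1])) d).getD p [])
      = d.getD p [] ++ ((l.filter (fun jp => jp.2 == p)).map (·.1)) := by
  induction l generalizing d with
  | nil => simp
  | cons jp t ih =>
    simp only [List.foldl_cons, List.filter_cons]
    by_cases h : jp.2 = p
    · simp [ih, h]
    · simp [ih, PySem.Dict.getD_insert, h, Ne.symm h]

lemma pvPos_getD (factor_base : List Int) (p : Int) :
    (pvBuildPos factor_base).getD p []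
      = (((PySem.List.enumerate factor_base 0).filter (fun jp => jp.2 == p)).map (·.1)) := by
  unfold pvBuildPos
  simp [pvPos_fold]

lemma pvPos_mem (factor_base : List Int) (p : Int) (i : Int) :
    i ∈ (pvBuildPos factor_base).getD p []
      ↔ (0 ≤ i ∧ i.toNat < factor_base.length ∧ factor_base.getD i.toNat 0 = p) := by
  rw [pvPos_getD]
  simp only [List.mem_map, List.mem_filter, PySem.List.mem_enumerate_iff, beq_iff_eq]
  constructor
  · rintro ⟨jp, ⟨⟨k, hk, rfl⟩, hp⟩, rfl⟩
    refine ⟨by omega, ?_, ?_⟩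
    · omega
    · have hk' : ((0 : Int) + (k : Int)).toNat = k := by omega
      rw [hk', List.getD_eq_getElem _ _ hk]
      simpa using hp
  · rintro ⟨h0, hk, hp⟩
    refine ⟨((0 : Int) + (i.toNat : Int), factor_base[i.toNat]'hk), ⟨⟨i.toNat, hk, rfl⟩, ?_⟩, by omega⟩
    rw [List.getD_eq_getElem _ _ hk] at hp
    simpa using hp

lemma pvPos_nodup (factor_base : List Int) (p : Int) :
    ((pvBuildPos factor_base).getD p []).Nodup := by
  rw [pvPos_getD]
  have h : (PySem.List.enumerate factor_base 0).Pairwise (fun a b => a.1 < b.1) :=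
    PySem.List.pairwise_lt_enumerate factor_base 0
  have hf := h.filter (fun jp => jp.2 == p)
  have hm : (((PySem.List.enumerate factor_base 0).filter (fun jp => jp.2 == p)).map
      (·.1)).Pairwise (· < ·) :=
    List.Pairwise.map _ (fun _ _ hab => hab) hf
  exact hm.imp (fun hab => ne_of_lt hab)

-- toggling a nodup in-range index list flips exactly those entries
lemma pvToggle_fold (js : List Int) (r : List Int) (hnd : js.Nodup)
    (hb : ∀ j ∈ js, 0 ≤ j ∧ j.toNat < r.length) :
    ((js.foldl (fun r j => PySem.List.pySetD r j (1 - PySem.List.pyGetD r j 0)) r).length = r.length)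
    ∧ ∀ (i : Nat), i < r.length →
        PySem.List.pyGetD (js.foldl (fun r j => PySem.List.pySetD r j (1 - PySem.List.pyGetD r j 0)) r) (i : Int) 0
          = if (i : Int) ∈ js then 1 - PySem.List.pyGetD r (i : Int) 0 else PySem.List.pyGetD r (i : Int) 0 := by
  induction js generalizing r with
  | nil => simp
  | cons j t ih =>
    obtain ⟨hj0, hjlt⟩ := hb j (by simp)
    have hjcast : ((j.toNat : Int)) = j := Int.toNat_of_nonneg hj0
    have hset : PySem.List.pySetD r j (1 - PySem.List.pyGetD r j 0)
        = r.set j.toNat (1 - PySem.List.pyGetD r j 0) :=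
      PySem.List.pySetD_of_nonneg r _ hj0
    have hlen' : (r.set j.toNat (1 - PySem.List.pyGetD r j 0)).length = r.length := by simp
    have hnd' : t.Nodup := hnd.of_cons
    have hjnot : j ∉ t := by simp at hnd; exact hnd.1
    have hb' : ∀ k ∈ t, 0 ≤ k ∧ k.toNat < (r.set j.toNat (1 - PySem.List.pyGetD r j 0)).length := by
      intro k hk; have := hb k (by simp [hk]); simpa [hlen'] using this
    obtain ⟨ihlen, ihget⟩ := ih _ hnd' hb'
    simp only [List.foldl_cons, hset]
    refine ⟨by rw [ihlen, hlen'], ?_⟩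
    intro i hi
    rw [ihget i (by rwa [hlen'])]
    have hgetset : ∀ (m : Nat), m < r.length →
        PySem.List.pyGetD (r.set j.toNat (1 - PySem.List.pyGetD r j 0)) (m : Int) 0
          = if m = j.toNat then 1 - PySem.List.pyGetD r j 0 else PySem.List.pyGetD r (m : Int) 0 := by
      intro m hm
      rw [← hset, ← hjcast, PySem.List.pyGetD_pySetD_natCast _ _ _ _ _ hjlt]
      simp only [Int.toNat_natCast]
      rfl
    by_cases hij : (i : Int) = j
    · have hinat : i = j.toNat := by omega
      have hit : (i : Int) ∉ t := by rwa [hij]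
      rw [if_neg hit, hgetset i hi, if_pos hinat,
        if_pos (show ((i : Nat) : Int) ∈ j :: t by simp [hij]), hij]
    · have hinat : i ≠ j.toNat := by omega
      by_cases hmem : (i : Int) ∈ t
      · simp [hij, hmem, hgetset i hi, hinat]
      · simp [hij, hmem, hgetset i hi, hinat]

-- the fac fold: entry i ends up toggled iff fb[i] occurs an odd number of times in fac
lemma pvRow_fold (factor_base : List Int) (fac : List Int) (r : List Int)
    (hlen : r.length = factor_base.length) :
    ((fac.foldl (fun r p =>
        ((pvBuildPos factor_base).getD p []).foldl
          (fun r j => PySem.List.pySetD r j (1 - PySem.List.pyGetD r j 0)) r) r).length = factor_base.length)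
    ∧ ∀ (i : Nat), i < factor_base.length →
        PySem.List.pyGetD (fac.foldl (fun r p =>
            ((pvBuildPos factor_base).getD p []).foldl
              (fun r j => PySem.List.pySetD r j (1 - PySem.List.pyGetD r j 0)) r) r) (i : Int) 0
          = if 2 ∣ fac.count (factor_base.getD i 0)
            then PySem.List.pyGetD r (i : Int) 0
            else 1 - PySem.List.pyGetD r (i : Int) 0 := by
  induction fac generalizing r with
  | nil => refine ⟨hlen, fun i hi => ?_⟩; simp
  | cons p t ih =>
    have hb : ∀ j ∈ (pvBuildPos factor_base).getD p [], 0 ≤ j ∧ j.toNat < r.length := by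
      intro j hj; rw [pvPos_mem] at hj; exact ⟨hj.1, by omega⟩
    obtain ⟨slen, sget⟩ := pvToggle_fold _ r (pvPos_nodup factor_base p) hb
    obtain ⟨ihlen, ihget⟩ := ih _ (by rw [slen, hlen])
    refine ⟨by simpa only [List.foldl_cons] using ihlen, ?_⟩
    intro i hi
    simp only [List.foldl_cons]
    rw [ihget i hi, sget i (by omega)]
    have hq : ((i : Nat) : Int) ∈ (pvBuildPos factor_base).getD p []
        ↔ factor_base.getD i 0 = p := by
      rw [pvPos_mem]
      constructor
      · rintro ⟨-, -, h⟩; simpa using h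
      · intro h; exact ⟨by omega, by simpa using hi, by simpa using h⟩
    by_cases hp : factor_base.getD i 0 = p
    · rw [if_pos (hq.mpr hp)]
      have hc : List.count (factor_base.getD i 0) (p :: t)
          = List.count (factor_base.getD i 0) t + 1 := by
        have hp' : factor_base[i]?.getD 0 = p := by
          rw [← List.getD_eq_getElem?_getD]; exact hp
        simp [hp']
      rw [hc]
      split_ifs with h1 h2 <;> first | rfl | omega
    · rw [if_neg (fun h => hp (hq.mp h))]
      have hc : List.count (factor_base.getD i 0) (p :: t)
          = List.count (factor_base.getD i 0) t := by
        have hp' : ¬ (factor_base[i]?.getD 0 = p) := by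
          rw [← List.getD_eq_getElem?_getD]; exact hp
        simp [Ne.symm hp']
      rw [hc]

-- parity as an explicit 0/1 value: A's row entry
lemma pvCountMod (c : Nat) :
    PySem.Int.mod (c : Int) 2 = if 2 ∣ c then (0 : Int) else 1 := by
  rw [PySem.Int.mod_eq_emod_of_pos (by norm_num)]
  by_cases h : 2 ∣ c
  · rw [if_pos h]; omega
  · rw [if_neg h]; omega

-- B's finished row, elementwise
lemma pvRowB_get (factor_base fac : List Int) :
    ((pvRowB (pvBuildPos factor_base) factor_base.length fac).length = factor_base.length)
    ∧ ∀ (i : Nat), i < factor_base.length →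
        PySem.List.pyGetD (pvRowB (pvBuildPos factor_base) factor_base.length fac) (i : Int) 0
          = if 2 ∣ fac.count (factor_base.getD i 0) then (0 : Int) else 1 := by
  obtain ⟨h1, h2⟩ := pvRow_fold factor_base fac (List.replicate factor_base.length 0) (by simp)
  refine ⟨h1, fun i hi => ?_⟩
  have hr := h2 i hi
  have hrepl : PySem.List.pyGetD (List.replicate factor_base.length (0 : Int)) (i : Int) 0 = 0 := by
    rw [PySem.List.pyGetD_natCast]
    simp [List.getD_eq_getElem?_getD, hi]
  rw [hrepl] at hr
  simp only [pvRowB]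
  rw [hr]
  split_ifs <;> ring

-- the two rows agree
lemma pvRow_eq (factor_base fac : List Int) :
    genParityRowA factor_base fac = pvRowB (pvBuildPos factor_base) factor_base.length fac := by
  obtain ⟨hlen, hget⟩ := pvRowB_get factor_base fac
  apply List.ext_getElem
  · simpa [genParityRowA] using hlen.symm
  · intro i h1 h2
    have hi : i < factor_base.length := by simpa [genParityRowA] using h1
    have hR : (pvRowB (pvBuildPos factor_base) factor_base.length fac)[i]'h2
        = PySem.List.pyGetD (pvRowB (pvBuildPos factor_base) factor_base.length fac) (i : Int) 0 := by
      rw [PySem.List.pyGetD_natCast, List.getD_eq_getElem _ _ h2]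
    rw [hR, hget i hi]
    simp only [genParityRowA, List.getElem_map, List.getElem_range]
    by_cases hmem : factor_base.getD i 0 ∈ fac
    · rw [if_pos hmem, pvCountMod]
    · have hc : fac.count (factor_base.getD i 0) = 0 := List.count_eq_zero_of_not_mem hmem
      rw [if_neg hmem, hc]
      simp

-- the early-return loop equals building all rows then scanning
lemma pvLoop_scan (factor_base : List Int) (fns : List (List Int)) (m : List (List Int)) :
    genParityLoopA factor_base m fns
      = pvScanB (m ++ fns.map (pvRowB (pvBuildPos factor_base) factor_base.length))
          (fns.zip (fns.map (pvRowB (pvBuildPos factor_base) factor_base.length))) := by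
  induction fns generalizing m with
  | nil => simp [genParityLoopA, pvScanB]
  | cons fac rest ih =>
    simp only [genParityLoopA, List.map_cons, List.zip_cons_cons, pvScanB, pvRow_eq]
    split
    · rfl
    · rw [ih]
      simp [List.append_assoc]

-- ===== VERDICT =====
theorem gen_parity_matrix_spec : Claim_equal_gen_parity_matrix := by
  intro fns fb _
  unfold Spec_gen_parity_matrix gen_parity_matrix gen_parity_matrix_alt
  simpa using pvLoop_scan fb fns []
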